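-- pv_equiv track=rewrite | github.com/alexlee5124/Leetcodes | Leetcode75/1071_GCD_String_attempt1.py | gcdOfStrings
-- ===== SOURCE A (Python) =====
-- def gcdOfStrings(str1, str2):
--     """
--     :type str1: str
--     :type str2: str
--     :rtype: str
--     """
--     i = 0
--     while i < len(str1) or i < len(str2):
--         if  i < len(str1) and i < len(str2) and str1[i] != str2[i]:
--             return ""
--         if i == len(str1)-1 and i == len(str2)-1:
--             return str1
--         if i >= len(str1):
--             str2 = str2[i:]
--             i = 0
--             continue
--         if i >= len(str2):
--             str1 = str1[i:]
--             i = 0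
--             continue
--         i += 1
-- ===== SOURCE B (Python) =====
-- def gcdOfStrings(str1, str2):
--     if str1 + str2 != str2 + str1:
--         return ""
--     a, b = len(str1), len(str2)
--     while b:
--         a, b = b, a % b
--     return str1[:a]
-- ===== Notes on version B (the rewrite author's own statement) =====
-- stated objective: faster
-- what changed: Replaces A's repeated scan-and-slice subtractive loop by the classic concatenation-commutativity test (str1+str2 == str2+str1) followed by taking a prefix of length gcd(len1,len2) computed by Euclid's algorithm.
-- outside the precondition, e.g. on gcdOfStrings('', ''): A returns None, B returns ''; on gcdOfStrings('', 'a'): A does not finish within the time limit, B returns ''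
import Mathlib
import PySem

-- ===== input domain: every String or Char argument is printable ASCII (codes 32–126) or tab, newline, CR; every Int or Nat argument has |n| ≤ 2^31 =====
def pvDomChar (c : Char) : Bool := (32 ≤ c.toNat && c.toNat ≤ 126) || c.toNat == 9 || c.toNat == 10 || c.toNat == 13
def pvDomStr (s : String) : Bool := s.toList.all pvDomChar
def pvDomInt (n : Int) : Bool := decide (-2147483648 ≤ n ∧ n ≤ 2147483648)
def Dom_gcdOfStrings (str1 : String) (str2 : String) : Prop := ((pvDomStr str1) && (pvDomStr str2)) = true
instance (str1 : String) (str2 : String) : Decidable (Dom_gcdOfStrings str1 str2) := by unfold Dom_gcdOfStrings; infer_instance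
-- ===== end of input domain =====

-- B replaces A's quadratic scan-and-slice subtractive loop by the linear
-- concatenation-commutativity test plus a gcd-length prefix (return value only; neither mutates).

-- ===== PORT A =====
-- A's while loop over mutable (str1, str2, i); the fuel argument only makes the
-- transliteration total: it is large enough for every input on which A terminates
-- (both strings nonempty), and on fuel exhaustion we return "" (unreachable under Pre_).
def pvLoopA : Nat → List Char → List Char → Nat → List Char
  | 0, _, _, _ => []
  | f + 1, s1, s2, i =>
    if i < s1.length ∨ i < s2.length then
      -- if i < len(str1) and i < len(str2) and str1[i] != str2[i]: return ""
      if i < s1.length ∧ i < s2.length ∧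
          PySem.List.pyGet? s1 (i : Int) ≠ PySem.List.pyGet? s2 (i : Int) then []
      -- if i == len(str1)-1 and i == len(str2)-1: return str1
      else if (i : Int) = (s1.length : Int) - 1 ∧ (i : Int) = (s2.length : Int) - 1 then s1
      -- if i >= len(str1): str2 = str2[i:]; i = 0; continue
      else if s1.length ≤ i then pvLoopA f s1 (PySem.List.slice s2 (some (i : Int)) none) 0
      -- if i >= len(str2): str1 = str1[i:]; i = 0; continue
      else if s2.length ≤ i then pvLoopA f (PySem.List.slice s1 (some (i : Int)) none) s2 0
      else pvLoopA f s1 s2 (i + 1)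
    else []  -- Python falls off the loop and returns None (only both-empty; outside Pre_)

def gcdOfStrings (str1 : String) (str2 : String) : String :=
  String.mk (pvLoopA ((str1.toList.length + str2.toList.length + 1) ^ 2)
    str1.toList str2.toList 0)

-- ===== PORT B =====
-- 'a, b = b, a % b' loop of Source B
def pvEuclid : Nat → Nat → Nat
  | a, 0 => a
  | a, b + 1 => pvEuclid (b + 1) (a % (b + 1))
  termination_by a b => b
  decreasing_by exact Nat.mod_lt _ (Nat.succ_pos _)

def gcdOfStrings_alt (str1 : String) (str2 : String) : String :=
  let a := str1.toList
  let b := str2.toList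
  if a ++ b ≠ b ++ a then ""
  else String.mk (PySem.List.slice a none (some ((pvEuclid a.length b.length : Nat) : Int)))

-- ===== PRECONDITION & SPEC =====
-- Pre_ excludes empty strings: on ('', '') A's loop exits and returns None (not a str),
-- and when exactly one string is empty A's 'str2 = str2[i:]' with i = 0 loops forever.
def Pre_gcdOfStrings (str1 : String) (str2 : String) : Prop := str1 ≠ "" ∧ str2 ≠ ""
instance (str1 : String) (str2 : String) : Decidable (Pre_gcdOfStrings str1 str2) := by
  unfold Pre_gcdOfStrings; infer_instance
def pvWitness_gcdOfStrings : String × String := ("abab", "ab")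

def Spec_gcdOfStrings (str1 : String) (str2 : String) (out : String) : Prop := out = gcdOfStrings_alt str1 str2
instance (str1 : String) (str2 : String) (out : String) : Decidable (Spec_gcdOfStrings str1 str2 out) := by unfold Spec_gcdOfStrings; infer_instance

-- ===== CLAIM (what is proved, stated in full; the proofs are below) =====
def Claim_equal_gcdOfStrings : Prop := ∀ (str1 : String) (str2 : String), Dom_gcdOfStrings str1 str2 → Pre_gcdOfStrings str1 str2 → Spec_gcdOfStrings str1 str2 (gcdOfStrings str1 str2)

-- ===== LEMMAS AND PROOFS =====

-- B's result at list level (with Nat.gcd; pvEuclid_eq bridges to the port).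
def pvRefB (a b : List Char) : List Char :=
  if a ++ b = b ++ a then a.take (Nat.gcd a.length b.length) else []

theorem pvEuclid_eq (b a : Nat) : pvEuclid a b = Nat.gcd a b := by
  induction b using Nat.strong_induction_on generalizing a with
  | _ b ih =>
    match b with
    | 0 => simp [pvEuclid]
    | Nat.succ n =>
      rw [pvEuclid, ih _ (Nat.mod_lt _ (Nat.succ_pos n)),
        Nat.gcd_comm a (n + 1), Nat.gcd_rec (n + 1) a, Nat.gcd_comm]

theorem pv_comm_agree {a b : List Char} (h : a ++ b = b ++ a) {i : Nat}
    (h1 : i < a.length) (h2 : i < b.length) : a[i]? = b[i]? := by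
  have := congrArg (fun l => l[i]?) h
  simpa [List.getElem?_append_left, h1, h2] using this

theorem pv_refB_self (a : List Char) : pvRefB a a = a := by
  simp [pvRefB]

theorem pv_refB_drop2 {a b : List Char} (ha : a ≠ []) (hlt : a.length < b.length)
    (hpre : b.take a.length = a) : pvRefB a b = pvRefB a (b.drop a.length) := by
  set c := b.drop a.length with hc
  have hb : b = a ++ c := by rw [← hpre, hc, List.take_append_drop]
  have hcond : (a ++ b = b ++ a) ↔ (a ++ c = c ++ a) := by
    rw [hb]
    constructor
    · intro h
      apply List.append_cancel_left (as := a)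
      simpa [List.append_assoc] using h
    · intro h
      calc a ++ (a ++ c) = a ++ (c ++ a) := by rw [h]
        _ = a ++ c ++ a := (List.append_assoc _ _ _).symm
  have hlen : b.length = a.length + c.length := by rw [hb]; simp
  unfold pvRefB
  by_cases h : a ++ c = c ++ a
  · rw [if_pos (hcond.mpr h), if_pos h, hlen, Nat.gcd_self_add_right]
  · rw [if_neg (fun hh => h (hcond.mp hh)), if_neg h]

theorem pv_refB_drop1 {a b : List Char} (hb : b ≠ []) (hlt : b.length < a.length)
    (hpre : a.take b.length = b) : pvRefB a b = pvRefB (a.drop b.length) b := by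
  set c := a.drop b.length with hc
  have ha : a = b ++ c := by rw [← hpre, hc, List.take_append_drop]
  have hclen : 0 < c.length := by
    have := congrArg List.length ha
    simp at this; omega
  have hcond : (a ++ b = b ++ a) ↔ (c ++ b = b ++ c) := by
    rw [ha]
    constructor
    · intro h
      apply List.append_cancel_left (as := b)
      simpa [List.append_assoc] using h
    · intro h
      calc b ++ c ++ b = b ++ (c ++ b) := List.append_assoc _ _ _
        _ = b ++ (b ++ c) := by rw [h]
  have hlen : a.length = b.length + c.length := by rw [ha]; simp
  unfold pvRefB
  by_cases h : c ++ b = b ++ c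
  · rw [if_pos (hcond.mpr h), if_pos h, hlen]
    have hg : Nat.gcd (b.length + c.length) b.length = Nat.gcd c.length b.length := by
      rw [Nat.add_comm, Nat.gcd_add_self_left]
    rw [hg]
    -- a.take g = c.take g where g = gcd(len c, len b) ≤ min
    have hgb : Nat.gcd c.length b.length ≤ b.length :=
      Nat.le_of_dvd (by simpa [List.length_pos_iff] using hb) (Nat.gcd_dvd_right _ _)
    have hgc : Nat.gcd c.length b.length ≤ c.length :=
      Nat.le_of_dvd hclen (Nat.gcd_dvd_left _ _)
    set g := Nat.gcd c.length b.length with hg'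
    have h1 : (b ++ c).take g = b.take g := List.take_append_of_le_length hgb
    have h2 : (c ++ b).take g = c.take g := List.take_append_of_le_length hgc
    have h3 : (b ++ c).take g = (c ++ b).take g := by rw [h]
    rw [ha, h1, ← h2, ← h3, h1]
  · rw [if_neg (fun hh => h (hcond.mp hh)), if_neg h]

theorem pv_master : ∀ (f : Nat) (a b : List Char) (i : Nat),
    1 ≤ a.length → 1 ≤ b.length → i ≤ a.length → i ≤ b.length →
    (i < a.length ∨ i < b.length) → a.take i = b.take i →
    (a.length + b.length + 1) ^ 2 ≤ f + i →
    pvLoopA f a b i = pvRefB a b := by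
  intro f
  induction f with
  | zero =>
    intro a b i h1 h2 h3 h4 h5 h6 hf
    exfalso
    have : a.length + b.length + 1 ≤ (a.length + b.length + 1) ^ 2 :=
      Nat.le_self_pow (by norm_num) _
    omega
  | succ f ih =>
    intro a b i h1 h2 h3 h4 h5 h6 hf
    rw [pvLoopA, if_pos h5]
    split_ifs with hmis hend hra hrb
    · -- mismatch: chars differ, so a ++ b ≠ b ++ a
      obtain ⟨hia, hib, hne⟩ := hmis
      have : a ++ b ≠ b ++ a := by
        intro h
        exact hne (by simpa [PySem.List.pyGet?_natCast] using pv_comm_agree h hia hib)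
      simp [pvRefB, this]
    · -- both at last index: strings are equal
      have hia : i < a.length := by omega
      have hib : i < b.length := by omega
      have hget : a[i]? = b[i]? := by
        by_contra hne
        exact hmis ⟨hia, hib, by simpa [PySem.List.pyGet?_natCast] using hne⟩
      have hlen : a.length = i + 1 ∧ b.length = i + 1 := by
        obtain ⟨e1, e2⟩ := hend
        omega
      have hab : a = b := by
        have ht : a.take (i + 1) = b.take (i + 1) := by
          rw [List.take_succ, List.take_succ, h6, hget]
        calc a = a.take a.length := List.take_length.symm
          _ = a.take (i + 1) := by rw [hlen.1]
          _ = b.take (i + 1) := ht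
          _ = b.take b.length := by rw [hlen.2]
          _ = b := List.take_length
      rw [hab, pv_refB_self]
    · -- i >= len a: reset with str2 = str2[i:]
      have hie : i = a.length := by omega
      have hib : i < b.length := by omega
      rw [PySem.List.slice_from_natCast]
      have hdlen : (b.drop i).length = b.length - i := by simp
      have hpre : b.take a.length = a := by
        rw [← hie, ← h6, hie, List.take_length]
      have hfuel : (a.length + (b.drop i).length + 1) ^ 2 ≤ f + 0 := by
        rw [hdlen]
        have e1 : a.length + (b.length - i) + 1 = b.length + 1 := by omega
        rw [e1]
        have : (b.length + 1) ^ 2 + i + 1 ≤ (a.length + b.length + 1) ^ 2 := by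
          nlinarith [h1, hib]
        omega
      rw [ih a (b.drop i) 0 h1 (by omega) (by omega) (by omega)
        (Or.inl (by omega)) (by simp) hfuel]
      rw [hie]
      exact (pv_refB_drop2 (List.ne_nil_of_length_pos (by omega)) (by omega) hpre).symm
    · -- i >= len b: reset with str1 = str1[i:]
      have hie : i = b.length := by omega
      have hia : i < a.length := by omega
      rw [PySem.List.slice_from_natCast]
      have hpre : a.take b.length = b := by
        rw [← hie, h6, hie, List.take_length]
      have hfuel : ((a.drop i).length + b.length + 1) ^ 2 ≤ f + 0 := by
        have hdlen : (a.drop i).length = a.length - i := by simp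
        rw [hdlen]
        have e1 : (a.length - i) + b.length + 1 = a.length + 1 := by omega
        rw [e1]
        have : (a.length + 1) ^ 2 + i + 1 ≤ (a.length + b.length + 1) ^ 2 := by
          nlinarith [h2, hia]
        omega
      rw [ih (a.drop i) b 0 (by simp; omega) h2 (by omega) (by omega)
        (Or.inr (by omega)) (by simp) hfuel]
      rw [hie]
      exact (pv_refB_drop1 (List.ne_nil_of_length_pos (by omega)) (by omega) hpre).symm
    · -- increment
      have hia : i < a.length := by omega
      have hib : i < b.length := by omega
      have hget : a[i]? = b[i]? := by
        by_contra hne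
        exact hmis ⟨hia, hib, by simpa [PySem.List.pyGet?_natCast] using hne⟩
      have ht : a.take (i + 1) = b.take (i + 1) := by
        rw [List.take_succ, List.take_succ, h6, hget]
      have hor : i + 1 < a.length ∨ i + 1 < b.length := by
        by_contra hno
        rw [not_or, Nat.not_lt, Nat.not_lt] at hno
        exact hend ⟨by omega, by omega⟩
      exact ih a b (i + 1) h1 h2 (by omega) (by omega) hor ht (by omega)

-- ===== VERDICT (by name: the statement is the Claim_ definition above) =====
theorem gcdOfStrings_spec : Claim_equal_gcdOfStrings := by
  intro str1 str2 _hdom hpre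
  obtain ⟨hp1, hp2⟩ := hpre
  have h1 : 1 ≤ str1.toList.length := by
    rcases Nat.eq_zero_or_pos str1.toList.length with h | h
    · exact absurd (String.ext (by simpa using List.length_eq_zero_iff.mp h)) hp1
    · exact h
  have h2 : 1 ≤ str2.toList.length := by
    rcases Nat.eq_zero_or_pos str2.toList.length with h | h
    · exact absurd (String.ext (by simpa using List.length_eq_zero_iff.mp h)) hp2
    · exact h
  unfold Spec_gcdOfStrings gcdOfStrings gcdOfStrings_alt
  rw [pv_master _ _ _ 0 h1 h2 (by omega) (by omega) (Or.inl (by omega)) (by simp)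
    (by omega)]
  unfold pvRefB
  by_cases h : str1.toList ++ str2.toList = str2.toList ++ str1.toList
  · rw [if_pos h, if_neg (not_not_intro h), PySem.List.slice_to_natCast, pvEuclid_eq]
  · rw [if_neg h, if_pos h]
    rfl
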